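-- pv_equiv track=rewrite | github.com/lfletcher23/double-major-optimization | Model/setup_model.py | choose_correct_bucket
-- ===== SOURCE A (Python) =====
-- def choose_correct_bucket(course, buckets_list, buckets_dict):
--     exact_match = False
--     level_match = False
--     dept_match = False
--
--     split_course = course.split("_")
--     course_dept = split_course[0]
--     course_level = split_course[1][0]
--     dept_match_key = course_dept + "_DEPT"
--     level_match_key = course_dept + "_DEPT_" + str(course_level) + "000_L"
--     matched_bucket = "No match found"
--     for each_bucket in buckets_list:
--         if not exact_match:
--             contents = buckets_dict[each_bucket]["Bucket Contents"]
--             if course in contents: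
--                 exact_match = True
--                 matched_bucket = each_bucket
--             elif not exact_match and level_match_key in contents:
--                 level_match = True
--                 matched_bucket = each_bucket
--             elif not level_match and not exact_match and dept_match_key in contents:
--                 dept_match = True
--                 matched_bucket = each_bucket
--     return matched_bucket
-- ===== SOURCE B (Python) =====
-- def choose_correct_bucket(course, buckets_list, buckets_dict):
--     split_course = course.split("_")
--     course_dept = split_course[0]
--     course_level = split_course[1][0]
--     dept_match_key = course_dept + "_DEPT"
--     level_match_key = course_dept + "_DEPT_" + course_level + "000_L"
--
--     # Pass 1: first bucket containing the course exactly wins (stop immediately,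
--     # so buckets after it are never looked up).
--     for each_bucket in buckets_list:
--         if course in buckets_dict[each_bucket]["Bucket Contents"]:
--             return each_bucket
--
--     # No exact match: last bucket containing the level key, else last with the dept key.
--     level_hits = [b for b in buckets_list if level_match_key in buckets_dict[b]["Bucket Contents"]]
--     if level_hits:
--         return level_hits[-1]
--     dept_hits = [b for b in buckets_list if dept_match_key in buckets_dict[b]["Bucket Contents"]]
--     if dept_hits:
--         return dept_hits[-1]
--     return "No match found"
-- ===== Notes on version B (the rewrite author's own statement) =====
-- stated objective: simpler
-- what changed: A's single scan with three boolean flags and priority-ordered elif updates is replaced by an early-return pass for the exact match followed by one filter-and-take-last pass per fallback key (level key, then dept key).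
import Mathlib
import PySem

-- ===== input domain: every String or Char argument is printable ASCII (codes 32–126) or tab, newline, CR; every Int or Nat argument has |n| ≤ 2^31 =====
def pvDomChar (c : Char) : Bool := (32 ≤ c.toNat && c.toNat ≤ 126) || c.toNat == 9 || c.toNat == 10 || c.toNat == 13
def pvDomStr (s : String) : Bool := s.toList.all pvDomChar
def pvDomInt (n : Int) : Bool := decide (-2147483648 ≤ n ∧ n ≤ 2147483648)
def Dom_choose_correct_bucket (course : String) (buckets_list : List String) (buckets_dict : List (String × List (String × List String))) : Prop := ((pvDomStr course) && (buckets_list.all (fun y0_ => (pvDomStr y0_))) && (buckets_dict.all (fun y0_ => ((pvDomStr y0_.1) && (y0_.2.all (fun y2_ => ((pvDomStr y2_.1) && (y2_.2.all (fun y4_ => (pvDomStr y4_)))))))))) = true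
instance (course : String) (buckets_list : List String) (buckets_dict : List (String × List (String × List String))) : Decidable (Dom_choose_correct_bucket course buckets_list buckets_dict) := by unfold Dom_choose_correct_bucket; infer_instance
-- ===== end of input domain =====

-- B replaces A's one scan with three state flags by an early-return exact pass followed by
-- a filter-and-take-last pass per fallback key (objective: simpler).
-- Shared by both ports: buckets_dict[b]["Bucket Contents"] (both Pythons have this very expression).
-- none = Python KeyError; excluded by Pre_choose_correct_bucket, where the total getD [] form is never reached.
def pvCts (buckets_dict : List (String × List (String × List String))) (b : String) : Option (List String) :=
  (buckets_dict.lookup b).bind (fun d => d.lookup "Bucket Contents")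

def pvCtsD (buckets_dict : List (String × List (String × List String))) (b : String) : List String :=
  (pvCts buckets_dict b).getD []

-- Shared by both ports: the four lines computing split_course / course_dept / course_level / keys
-- (identical in A and in B). Returns (dept_match_key, level_match_key).
-- The getD defaults stand where Python raises IndexError; Pre_choose_correct_bucket excludes those inputs.
def pvKeys (course : String) : String × String :=
  let split_course := (PySem.Str.split? course "_").getD []
  let course_dept := split_course.getD 0 ""
  let course_level := ((split_course.getD 1 "").toList.headD ' ').toString
  (course_dept ++ "_DEPT", course_dept ++ "_DEPT_" ++ course_level ++ "000_L")

-- ===== PORT A =====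
-- A's for-loop: state (exact_match, level_match, dept_match, matched_bucket).
def chooseA_go (course lkey dkey : String) (bd : List (String × List (String × List String))) :
    List String → Bool → Bool → Bool → String → String
  | [], _, _, _, m => m
  | b :: rest, ex, lv, dp, m =>
    if ex then chooseA_go course lkey dkey bd rest ex lv dp m
    else
      let contents := pvCtsD bd b
      if course ∈ contents then chooseA_go course lkey dkey bd rest true lv dp b
      else if !ex && lkey ∈ contents then chooseA_go course lkey dkey bd rest ex true dp b
      else if !lv && !ex && dkey ∈ contents then chooseA_go course lkey dkey bd rest ex lv true b
      else chooseA_go course lkey dkey bd rest ex lv dp m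

def choose_correct_bucket (course : String) (buckets_list : List String) (buckets_dict : List (String × List (String × List String))) : String :=
  let ks := pvKeys course
  chooseA_go course ks.2 ks.1 buckets_dict buckets_list false false false "No match found"

-- ===== PORT B =====
-- B's first loop: return the first bucket whose contents contain the course exactly.
def chooseB_exact (course : String) (bd : List (String × List (String × List String))) :
    List String → Option String
  | [] => none
  | b :: rest => if course ∈ pvCtsD bd b then some b else chooseB_exact course bd rest

def choose_correct_bucket_alt (course : String) (buckets_list : List String) (buckets_dict : List (String × List (String × List String))) : String :=
  let ks := pvKeys course
  match chooseB_exact course buckets_dict buckets_list with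
  | some b => b
  | none =>
    match (buckets_list.filter (fun b => ks.2 ∈ pvCtsD buckets_dict b)).getLast? with
    | some b => b
    | none =>
      ((buckets_list.filter (fun b => ks.1 ∈ pvCtsD buckets_dict b)).getLast?).getD "No match found"

-- ===== PRECONDITION & SPEC =====
-- Exactly where the Python A returns: course splits into ≥ 2 parts with a nonempty second part
-- (else IndexError), and a bucket lookup may only fail after an earlier bucket gave an exact match
-- (A stops looking things up once exact_match is set; else KeyError).
def Pre_choose_correct_bucket (course : String) (buckets_list : List String) (buckets_dict : List (String × List (String × List String))) : Prop :=
  (2 ≤ ((PySem.Str.split? course "_").getD []).length ∧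
    ((PySem.Str.split? course "_").getD []).getD 1 "" ≠ "") ∧
  (∀ i : Nat, i < buckets_list.length → pvCts buckets_dict (buckets_list.getD i "") = none →
    ∃ j : Nat, j < i ∧ course ∈ pvCtsD buckets_dict (buckets_list.getD j ""))

instance (course : String) (buckets_list : List String) (buckets_dict : List (String × List (String × List String))) : Decidable (Pre_choose_correct_bucket course buckets_list buckets_dict) := by unfold Pre_choose_correct_bucket; infer_instance

def pvWitness_choose_correct_bucket : String × List String × (List (String × List (String × List String))) :=
  ("CS_101", ["B1"], [("B1", [("Bucket Contents", ["CS_101"])])])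

def Spec_choose_correct_bucket (course : String) (buckets_list : List String) (buckets_dict : List (String × List (String × List String))) (out : String) : Prop := out = choose_correct_bucket_alt course buckets_list buckets_dict
instance (course : String) (buckets_list : List String) (buckets_dict : List (String × List (String × List String))) (out : String) : Decidable (Spec_choose_correct_bucket course buckets_list buckets_dict out) := by unfold Spec_choose_correct_bucket; infer_instance

-- ===== CLAIM (what is proved, stated in full; the proofs are below) =====
def Claim_equal_choose_correct_bucket : Prop := ∀ (course : String) (buckets_list : List String) (buckets_dict : List (String × List (String × List String))), Dom_choose_correct_bucket course buckets_list buckets_dict → Pre_choose_correct_bucket course buckets_list buckets_dict → Spec_choose_correct_bucket course buckets_list buckets_dict (choose_correct_bucket course buckets_list buckets_dict)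

-- ===== LEMMAS AND PROOFS =====

lemma chooseA_go_exact (course lkey dkey : String) (bd : List (String × List (String × List String)))
    (bl : List String) (lv dp : Bool) (m : String) :
    chooseA_go course lkey dkey bd bl true lv dp m = m := by
  induction bl generalizing lv dp m with
  | nil => rfl
  | cons b rest ih => simp [chooseA_go, ih]
lemma chooseA_go_eq (course lkey dkey : String) (bd : List (String × List (String × List String)))
    (bl : List String) (lv dp : Bool) (m : String) :
    chooseA_go course lkey dkey bd bl false lv dp m =
      match chooseB_exact course bd bl with
      | some b => b
      | none =>
        match (bl.filter (fun b => lkey ∈ pvCtsD bd b)).getLast? with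
        | some b => b
        | none =>
          if lv then m
          else ((bl.filter (fun b => dkey ∈ pvCtsD bd b)).getLast?).getD m := by
  induction bl generalizing lv dp m with
  | nil => cases lv <;> rfl
  | cons b rest ih =>
    by_cases hex : course ∈ pvCtsD bd b
    · simp [chooseA_go, chooseB_exact, hex, chooseA_go_exact]
    · by_cases hlv : lkey ∈ pvCtsD bd b
      · rw [show chooseA_go course lkey dkey bd (b :: rest) false lv dp m
            = chooseA_go course lkey dkey bd rest false true dp b by
              simp [chooseA_go, hex, hlv], ih]
        simp only [chooseB_exact, if_neg hex]
        cases hB : chooseB_exact course bd rest with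
        | some x => rfl
        | none =>
          simp only [List.filter_cons, hlv, decide_true, if_true, List.getLast?_cons]
          cases (rest.filter (fun b => decide (lkey ∈ pvCtsD bd b))).getLast? with
          | some x => rfl
          | none => rfl
      · by_cases hdp : dkey ∈ pvCtsD bd b
        · cases lv with
          | false =>
            rw [show chooseA_go course lkey dkey bd (b :: rest) false false dp m
                = chooseA_go course lkey dkey bd rest false false true b by
                  simp [chooseA_go, hex, hlv, hdp], ih]
            simp only [chooseB_exact, if_neg hex]
            cases hB : chooseB_exact course bd rest with
            | some x => rfl
            | none =>
              simp only [List.filter_cons, hlv, hdp, decide_true, decide_false,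
                Bool.false_eq_true, if_false, if_true, List.getLast?_cons]
              cases (rest.filter (fun b => decide (lkey ∈ pvCtsD bd b))).getLast? with
              | some x => rfl
              | none =>
                cases (rest.filter (fun b => decide (dkey ∈ pvCtsD bd b))).getLast? with
                | some x => rfl
                | none => rfl
          | true =>
            rw [show chooseA_go course lkey dkey bd (b :: rest) false true dp m
                = chooseA_go course lkey dkey bd rest false true dp m by
                  simp [chooseA_go, hex, hlv], ih]
            simp only [chooseB_exact, if_neg hex, List.filter_cons, hlv, decide_false,
              Bool.false_eq_true, if_false]
            cases chooseB_exact course bd rest with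
            | some x => rfl
            | none =>
              cases (rest.filter (fun b => decide (lkey ∈ pvCtsD bd b))).getLast? with
              | some x => rfl
              | none => rfl
        · rw [show chooseA_go course lkey dkey bd (b :: rest) false lv dp m
              = chooseA_go course lkey dkey bd rest false lv dp m by
                simp [chooseA_go, hex, hlv, hdp], ih]
          simp only [chooseB_exact, if_neg hex, List.filter_cons, hlv, hdp, decide_false,
            Bool.false_eq_true, if_false]

-- ===== VERDICT (by name: the statement is the Claim_ definition above) =====
theorem choose_correct_bucket_spec : Claim_equal_choose_correct_bucket := by
  intro course bl bd _ _
  unfold Spec_choose_correct_bucket choose_correct_bucket choose_correct_bucket_alt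
  rw [chooseA_go_eq]
  cases chooseB_exact course bd bl with
  | some b => rfl
  | none =>
    simp only []
    cases (bl.filter (fun b => (pvKeys course).2 ∈ pvCtsD bd b)).getLast? with
    | some b => rfl
    | none => rfl
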